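-- pv_equiv track=rewrite | github.com/hzg0601/md_book_reviser | src/content_revising/content_reviser.py | merge_issues_report
-- ===== SOURCE A (Python) =====
-- def merge_issues_report(issues_by_type: dict) -> str:
--     """
--     将各类问题合并成一个综合报告。
--
--     Args:
--         issues_by_type: 各类问题的字典
--
--     Returns:
--         str: 合并后的综合问题报告
--     """
--     merged_report = []
--     problem_type_names = {
--         "typo": "打字错误",
--         "factual": "事实性和常识性错误",
--         "punctuation": "标点符号误用",
--         "grammar": "语法错误",
--         "expression": "表达问题",
--         "formatting": "格式问题",
--         "terminology": "术语和风格问题",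
--         "reference": "引用错误",
--         "english_capitalization": "英文大小写错误"
--     }
--
--     issue_count = 0
--     for problem_type, issues in issues_by_type.items():
--         if issues and issues.strip() != "无问题":
--             # 提取编号的问题列表
--             lines = issues.strip().split('\n')
--             filtered_lines = []
--             for line in lines:
--                 if line.strip() and line.strip() != "无问题":
--                     # 重新编号以保持连续性
--                     issue_count += 1
--                     # 移除原有的编号，添加新的连续编号
--                     if '.' in line and line.split('.', 1)[0].isdigit():
--                         content = line.split('.', 1)[1].strip()
--                         filtered_lines.append(f"{issue_count}. {content}")
--                     else:
--                         filtered_lines.append(f"{issue_count}. {line.strip()}")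
--
--             if filtered_lines:
--                 merged_report.extend(filtered_lines)
--
--     if not merged_report:
--         return "无问题"
--
--     return '\n'.join(merged_report)
-- ===== SOURCE B (Python) =====
-- def merge_issues_report(issues_by_type: dict) -> str:
--     # Stage 1: merge every relevant issue text into one combined document.
--     merged_text = "\n".join(
--         issues.strip()
--         for issues in issues_by_type.values()
--         if issues and issues.strip() != "无问题"
--     )
--     # Stage 2: a single scan over the combined document's lines.
--     contents = []
--     for line in merged_text.split("\n"):
--         stripped = line.strip()
--         if stripped and stripped != "无问题":
--             if '.' in line and line.split('.', 1)[0].isdigit():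
--                 contents.append(line.split('.', 1)[1].strip())
--             else:
--                 contents.append(stripped)
--     if not contents:
--         return "无问题"
--     return "\n".join(f"{i}. {c}" for i, c in enumerate(contents, 1))
-- ===== Notes on version B (the rewrite author's own statement) =====
-- stated objective: alternative
-- what changed: B first joins all kept issue texts into one combined document string and then does a single flat scan over the combined document's lines, instead of A's nested per-entry line loops threading a running issue counter through the dict iteration.
import Mathlib
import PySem

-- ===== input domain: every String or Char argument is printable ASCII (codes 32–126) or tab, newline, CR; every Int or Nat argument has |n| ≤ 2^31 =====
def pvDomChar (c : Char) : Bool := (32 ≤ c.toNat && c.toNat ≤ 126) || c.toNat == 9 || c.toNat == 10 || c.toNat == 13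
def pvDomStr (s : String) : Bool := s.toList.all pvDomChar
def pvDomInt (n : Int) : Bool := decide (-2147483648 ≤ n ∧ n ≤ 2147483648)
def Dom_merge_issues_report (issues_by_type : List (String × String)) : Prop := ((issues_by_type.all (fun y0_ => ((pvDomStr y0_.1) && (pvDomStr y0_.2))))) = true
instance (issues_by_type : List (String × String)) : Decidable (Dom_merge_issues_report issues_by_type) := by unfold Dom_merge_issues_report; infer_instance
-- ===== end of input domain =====

-- B first concatenates all kept issue texts into one combined document and then makes a
-- single scan over the combined document's lines, instead of A's nested per-entry line
-- loops with a threaded counter (objective: alternative).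

-- ===== PORT A =====
def merge_issues_report (issues_by_type : List (String × String)) : String :=
  let st := issues_by_type.foldl (fun (st : List String × Int) p =>
    let issues := p.2
    if issues != "" && PySem.Str.strip issues != "无问题" then
      let lines := (PySem.Str.split? (PySem.Str.strip issues) "\n").getD []
      let inner := lines.foldl (fun (st2 : List String × Int) line =>
        if PySem.Str.strip line != "" && PySem.Str.strip line != "无问题" then
          let c := st2.2 + 1
          let parts := (PySem.Str.splitMax? line "." 1).getD []
          if PySem.Str.isIn "." line && PySem.Str.strIsdigit (parts.headD "") then
            let content := PySem.Str.strip ((parts[1]?).getD "")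
            (st2.1 ++ [PySem.Int.toStr c ++ ". " ++ content], c)
          else
            (st2.1 ++ [PySem.Int.toStr c ++ ". " ++ PySem.Str.strip line], c)
        else st2) ([], st.2)
      (if inner.1 ≠ [] then st.1 ++ inner.1 else st.1, inner.2)
    else st) ([], 0)
  if st.1 = [] then "无问题" else PySem.Str.join "\n" st.1

-- ===== PORT B =====
def merge_issues_report_alt (issues_by_type : List (String × String)) : String :=
  -- Stage 1: merge every relevant issue text into one combined document.
  let merged_text := PySem.Str.join "\n"
    (issues_by_type.filterMap (fun p =>
      if p.2 != "" && PySem.Str.strip p.2 != "无问题" then some (PySem.Str.strip p.2) else none))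
  -- Stage 2: a single scan over the combined document's lines.
  let contents := ((PySem.Str.split? merged_text "\n").getD []).foldl
    (fun (acc : List String) line =>
      let stripped := PySem.Str.strip line
      if stripped != "" && stripped != "无问题" then
        if PySem.Str.isIn "." line &&
            PySem.Str.strIsdigit ((((PySem.Str.splitMax? line "." 1).getD []).headD "")) then
          acc ++ [PySem.Str.strip ((((PySem.Str.splitMax? line "." 1).getD [])[1]?).getD "")]
        else acc ++ [stripped]
      else acc) []
  if contents = [] then "无问题"
  else PySem.Str.join "\n" ((PySem.List.enumerate contents 1).map
    (fun q => PySem.Int.toStr q.1 ++ ". " ++ q.2))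

-- ===== PRECONDITION & SPEC =====
def Spec_merge_issues_report (issues_by_type : List (String × String)) (out : String) : Prop := out = merge_issues_report_alt issues_by_type
instance (issues_by_type : List (String × String)) (out : String) : Decidable (Spec_merge_issues_report issues_by_type out) := by unfold Spec_merge_issues_report; infer_instance

-- ===== CLAIM (what is proved, stated in full; the proofs are below) =====
def Claim_equal_merge_issues_report : Prop := ∀ (issues_by_type : List (String × String)), Dom_merge_issues_report issues_by_type → Spec_merge_issues_report issues_by_type (merge_issues_report issues_by_type)

-- ===== LEMMAS AND PROOFS =====

-- proof-side names for the two loop bodies of port A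
def pvInnerStep (st2 : List String × Int) (line : String) : List String × Int :=
  if PySem.Str.strip line != "" && PySem.Str.strip line != "无问题" then
    let c := st2.2 + 1
    let parts := (PySem.Str.splitMax? line "." 1).getD []
    if PySem.Str.isIn "." line && PySem.Str.strIsdigit (parts.headD "") then
      let content := PySem.Str.strip ((parts[1]?).getD "")
      (st2.1 ++ [PySem.Int.toStr c ++ ". " ++ content], c)
    else
      (st2.1 ++ [PySem.Int.toStr c ++ ". " ++ PySem.Str.strip line], c)
  else st2

def pvOuterStep (st : List String × Int) (p : String × String) : List String × Int :=
  if p.2 != "" && PySem.Str.strip p.2 != "无问题" then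
    let inner := ((PySem.Str.split? (PySem.Str.strip p.2) "\n").getD []).foldl pvInnerStep ([], st.2)
    (if inner.1 ≠ [] then st.1 ++ inner.1 else st.1, inner.2)
  else st

-- port A is exactly the fold of pvOuterStep (same lambdas, by definitional unfolding)
theorem pvA_eq (ibt : List (String × String)) :
    merge_issues_report ibt =
      (if (ibt.foldl pvOuterStep ([], 0)).1 = [] then "无问题"
       else PySem.Str.join "\n" (ibt.foldl pvOuterStep ([], 0)).1) := rfl

-- the content extracted from one kept line, and the line filter
def pvExtract (line : String) : String :=
  let parts := (PySem.Str.splitMax? line "." 1).getD []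
  if PySem.Str.isIn "." line && PySem.Str.strIsdigit (parts.headD "") then
    PySem.Str.strip ((parts[1]?).getD "")
  else
    PySem.Str.strip line

def pvKeep (line : String) : Bool :=
  PySem.Str.strip line != "" && PySem.Str.strip line != "无问题"

-- the numbered rendering of a content list, starting at count k
def pvNumbered (k : Int) (cs : List String) : List String :=
  (PySem.List.enumerate cs (k + 1)).map (fun q => PySem.Int.toStr q.1 ++ ". " ++ q.2)

-- lines of one text, as Python's text.split("\n")
def pvLinesOf (b : String) : List String := (PySem.Str.split? b "\n").getD []

-- the contents A collects for one dict entry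
def pvEntry (p : String × String) : List String :=
  if p.2 != "" && PySem.Str.strip p.2 != "无问题" then
    ((pvLinesOf (PySem.Str.strip p.2)).filter pvKeep).map pvExtract
  else []

theorem pvNumbered_nil (k : Int) : pvNumbered k [] = [] := by
  simp [pvNumbered, PySem.List.enumerate_nil]

theorem pvNumbered_cons (k : Int) (c : String) (cs : List String) :
    pvNumbered k (c :: cs) = (PySem.Int.toStr (k + 1) ++ ". " ++ c) :: pvNumbered (k + 1) cs := by
  simp [pvNumbered, PySem.List.enumerate_cons]

theorem pvNumbered_append (k : Int) (cs ds : List String) :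
    pvNumbered k (cs ++ ds) = pvNumbered k cs ++ pvNumbered (k + cs.length) ds := by
  simp [pvNumbered, PySem.List.enumerate_append]
  ring_nf

theorem pvNumbered_eq_nil_iff (k : Int) (cs : List String) : pvNumbered k cs = [] ↔ cs = [] := by
  cases cs with
  | nil => simp [pvNumbered_nil]
  | cons a l => rw [pvNumbered_cons]; simp

theorem pvInnerStep_pos (acc : List String) (k : Int) (l : String) (h : pvKeep l = true) :
    pvInnerStep (acc, k) l = (acc ++ [PySem.Int.toStr (k + 1) ++ ". " ++ pvExtract l], k + 1) := by
  unfold pvInnerStep pvExtract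
  rw [if_pos (by exact h)]
  by_cases h2 : (PySem.Str.isIn "." l && PySem.Str.strIsdigit ((((PySem.Str.splitMax? l "." 1).getD []).headD ""))) = true
  · rw [if_pos h2, if_pos h2]
  · rw [if_neg h2, if_neg h2]

theorem pvInnerStep_neg (acc : List String) (k : Int) (l : String) (h : ¬ pvKeep l = true) :
    pvInnerStep (acc, k) l = (acc, k) := by
  unfold pvInnerStep
  rw [if_neg (by exact h)]

theorem pv_inner (lines : List String) (acc : List String) (k : Int) :
    lines.foldl pvInnerStep (acc, k)
      = (acc ++ pvNumbered k ((lines.filter pvKeep).map pvExtract),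
         k + (((lines.filter pvKeep).length : Int))) := by
  induction lines generalizing acc k with
  | nil => simp [pvNumbered_nil]
  | cons l ls ih =>
    rw [List.foldl_cons, List.filter_cons]
    by_cases h : pvKeep l = true
    · rw [pvInnerStep_pos acc k l h, if_pos h, ih, List.map_cons, pvNumbered_cons]
      simp only [Prod.mk.injEq, List.append_assoc, List.singleton_append, List.length_cons]
      constructor
      · trivial
      · push_cast
        ring
    · rw [pvInnerStep_neg acc k l h, if_neg h, ih]

theorem pvOuterStep_eq (acc : List String) (k : Int) (p : String × String) :
    pvOuterStep (acc, k) p = (acc ++ pvNumbered k (pvEntry p), k + ((pvEntry p).length : Int)) := by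
  unfold pvOuterStep pvEntry pvLinesOf
  by_cases h : (p.2 != "" && PySem.Str.strip p.2 != "无问题") = true
  · rw [if_pos h, if_pos h]
    have hi := pv_inner ((PySem.Str.split? (PySem.Str.strip p.2) "\n").getD []) [] k
    rw [hi]
    dsimp only
    rw [List.length_map]
    generalize (PySem.Str.split? (PySem.Str.strip p.2) "\n").getD [] = L
    by_cases hne : pvNumbered k ((L.filter pvKeep).map pvExtract) = []
    · simp [hne]
    · simp [hne]
  · rw [if_neg h, if_neg h]
    simp [pvNumbered_nil]

theorem pv_outer (ibt : List (String × String)) (acc : List String) (k : Int) :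
    ibt.foldl pvOuterStep (acc, k)
      = (acc ++ pvNumbered k (ibt.flatMap pvEntry), k + ((ibt.flatMap pvEntry).length : Int)) := by
  induction ibt generalizing acc k with
  | nil => simp [pvNumbered_nil]
  | cons p ps ih =>
    rw [List.foldl_cons, pvOuterStep_eq, ih, List.flatMap_cons, pvNumbered_append]
    simp only [Prod.mk.injEq, List.append_assoc, List.length_append]
    constructor
    · trivial
    · push_cast
      ring

-- ===== B-side: the fold body and the block selector of port B, named =====
def pvBStep (acc : List String) (line : String) : List String :=
  let stripped := PySem.Str.strip line
  if stripped != "" && stripped != "无问题" then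
    if PySem.Str.isIn "." line &&
        PySem.Str.strIsdigit ((((PySem.Str.splitMax? line "." 1).getD []).headD "")) then
      acc ++ [PySem.Str.strip ((((PySem.Str.splitMax? line "." 1).getD [])[1]?).getD "")]
    else acc ++ [stripped]
  else acc

def pvBlockOf (p : String × String) : Option String :=
  if p.2 != "" && PySem.Str.strip p.2 != "无问题" then some (PySem.Str.strip p.2) else none

-- port B is exactly this composition (same lambdas, by definitional unfolding)
theorem pvB_eq (ibt : List (String × String)) :
    merge_issues_report_alt ibt =
      (let contents := (pvLinesOf (PySem.Str.join "\n" (ibt.filterMap pvBlockOf))).foldl pvBStep []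
       if contents = [] then "无问题"
       else PySem.Str.join "\n" ((PySem.List.enumerate contents 1).map
         (fun q => PySem.Int.toStr q.1 ++ ". " ++ q.2))) := rfl

theorem pvBStep_eq (acc : List String) (line : String) :
    pvBStep acc line = if pvKeep line then acc ++ [pvExtract line] else acc := by
  unfold pvBStep pvKeep pvExtract
  by_cases h : (PySem.Str.strip line != "" && PySem.Str.strip line != "无问题") = true
  · rw [if_pos h, if_pos h]
    by_cases h2 : (PySem.Str.isIn "." line && PySem.Str.strIsdigit ((((PySem.Str.splitMax? line "." 1).getD []).headD ""))) = true
    · rw [if_pos h2, if_pos h2]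
    · rw [if_neg h2, if_neg h2]
  · rw [if_neg h, if_neg h]

theorem pvBStep_fold (lines acc : List String) :
    lines.foldl pvBStep acc = acc ++ (lines.filter pvKeep).map pvExtract := by
  induction lines generalizing acc with
  | nil => simp
  | cons l ls ih =>
    rw [List.foldl_cons, pvBStep_eq, List.filter_cons]
    by_cases h : pvKeep l = true
    · rw [if_pos h, if_pos h, ih]; simp
    · rw [if_neg h, if_neg h, ih]

-- ===== the single-character split of a combined document =====
def pvSp (c : Char) : List Char → List (List Char)
  | [] => [[]]
  | a :: rest => if a = c then [] :: pvSp c rest else (pvSp c rest).modifyHead (a :: ·)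

theorem pvModifyHead_id {α : Type} (l : List α) : List.modifyHead (fun x => x) l = l := by
  cases l <;> simp

theorem pvSp_ne_nil (c : Char) (l : List Char) : pvSp c l ≠ [] := by
  induction l with
  | nil => simp [pvSp]
  | cons a rest ih =>
    simp only [pvSp]
    by_cases h : a = c
    · simp [h]
    · rw [if_neg h]
      cases hr : pvSp c rest with
      | nil => exact absurd hr ih
      | cons x xs => simp

theorem pvGo_eq (c : Char) (fuel : Nat) (l cur : List Char) (acc : List (List Char))
    (h : l.length ≤ fuel) :
    PySem.Chars.splitOn.go [c] fuel l cur acc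
      = acc.reverse ++ (pvSp c l).modifyHead (cur.reverse ++ ·) := by
  induction fuel generalizing l cur acc with
  | zero =>
    have hl : l = [] := by simpa using h
    subst hl
    simp [PySem.Chars.splitOn.go, pvSp]
  | succ f ih =>
    cases l with
    | nil => simp [PySem.Chars.splitOn.go, pvSp]
    | cons a rest =>
      by_cases ha : a = c
      · subst ha
        rw [PySem.Chars.splitOn.go]
        simp only [List.isPrefixOf, BEq.rfl, Bool.true_and, if_pos]
        rw [List.length_singleton, List.drop_one, List.tail_cons]
        rw [ih rest [] (cur.reverse :: acc) (by simpa using h)]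
        simp [pvSp, pvModifyHead_id]
      · rw [PySem.Chars.splitOn.go]
        simp only [List.isPrefixOf, Bool.and_true]
        rw [if_neg (by simp [Ne.symm ha])]
        rw [ih rest (a :: cur) acc (by simpa using Nat.le_of_succ_le_succ h)]
        simp only [pvSp, if_neg ha, List.modifyHead_modifyHead]
        congr 1
        congr 1
        funext x
        simp

theorem pvSplitOn_eq (c : Char) (s : List Char) :
    PySem.Chars.splitOn s [c] = pvSp c s := by
  unfold PySem.Chars.splitOn
  rw [pvGo_eq c (s.length + 1) s [] [] (by omega)]
  simp [pvModifyHead_id]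

theorem pvSp_append (c : Char) (xs ys : List Char) :
    pvSp c (xs ++ c :: ys) = pvSp c xs ++ pvSp c ys := by
  induction xs with
  | nil => simp [pvSp]
  | cons a xs ih =>
    by_cases ha : a = c
    · simp only [List.cons_append, pvSp, if_pos ha, ih, List.cons_append]
    · simp only [List.cons_append, pvSp, if_neg ha, ih]
      cases hxs : pvSp c xs with
      | nil => exact absurd hxs (pvSp_ne_nil c xs)
      | cons h t => simp

theorem pvSp_intercalate (c : Char) (p : List Char) (ps : List (List Char)) :
    pvSp c ([c].intercalate (p :: ps)) = (p :: ps).flatMap (pvSp c) := by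
  induction ps generalizing p with
  | nil => simp [List.intercalate]
  | cons q qs ih =>
    have hint : [c].intercalate (p :: q :: qs) = p ++ [c] ++ [c].intercalate (q :: qs) := by
      simp [List.intercalate, List.intersperse]
    rw [hint, List.append_assoc, List.singleton_append, pvSp_append, ih]
    simp

theorem pvLinesOf_eq (b : String) :
    pvLinesOf b = (pvSp '\n' b.toList).map String.ofList := by
  have hsep : ("\n" : String).toList = ['\n'] := by decide
  simp [pvLinesOf, PySem.Str.split?, PySem.Chars.split?, hsep, pvSplitOn_eq]

theorem pvLines_join (b : String) (bs : List String) :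
    pvLinesOf (PySem.Str.join "\n" (b :: bs)) = (b :: bs).flatMap pvLinesOf := by
  have hsep : ("\n" : String).toList = ['\n'] := by decide
  rw [pvLinesOf_eq]
  have hj : (PySem.Str.join "\n" (b :: bs)).toList
      = ['\n'].intercalate ((b :: bs).map String.toList) := by
    simp [pysem, PySem.Chars.join, hsep]
  rw [hj, List.map_cons, pvSp_intercalate]
  rw [show (b.toList :: List.map String.toList bs) = List.map String.toList (b :: bs) from rfl]
  rw [List.flatMap_map, List.map_flatMap]
  congr 1
  funext a
  rw [pvLinesOf_eq]

theorem pvEntry_blocks (ibt : List (String × String)) :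
    (ibt.filterMap pvBlockOf).flatMap (fun b => ((pvLinesOf b).filter pvKeep).map pvExtract)
      = ibt.flatMap pvEntry := by
  induction ibt with
  | nil => simp
  | cons p ps ih =>
    by_cases h : (p.2 != "" && PySem.Str.strip p.2 != "无问题") = true
    · have hb : pvBlockOf p = some (PySem.Str.strip p.2) := by unfold pvBlockOf; rw [if_pos h]
      have he : pvEntry p = ((pvLinesOf (PySem.Str.strip p.2)).filter pvKeep).map pvExtract := by
        unfold pvEntry; rw [if_pos h]
      simp only [List.filterMap_cons, hb, List.flatMap_cons, ih, he]
    · have hb : pvBlockOf p = none := by unfold pvBlockOf; rw [if_neg h]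
      have he : pvEntry p = [] := by unfold pvEntry; rw [if_neg h]
      simp only [List.filterMap_cons, hb, List.flatMap_cons, ih, he, List.nil_append]

theorem pvB_contents (ibt : List (String × String)) :
    merge_issues_report_alt ibt =
      (if ibt.flatMap pvEntry = [] then "无问题"
       else PySem.Str.join "\n" (pvNumbered 0 (ibt.flatMap pvEntry))) := by
  rw [pvB_eq]
  have hc : (pvLinesOf (PySem.Str.join "\n" (ibt.filterMap pvBlockOf))).foldl pvBStep []
      = ibt.flatMap pvEntry := by
    cases hb : ibt.filterMap pvBlockOf with
    | nil =>
      rw [← pvEntry_blocks, hb]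
      have h1 : pvLinesOf (PySem.Str.join "\n" ([] : List String)) = [""] := by decide
      rw [h1, pvBStep_fold]
      simp [show pvKeep "" = false from by decide]
    | cons b bs =>
      rw [← pvEntry_blocks, hb, pvBStep_fold, pvLines_join, List.nil_append]
      rw [List.filter_flatMap, List.map_flatMap]
  dsimp only
  rw [hc]
  by_cases h : ibt.flatMap pvEntry = []
  · rw [if_pos h, if_pos h]
  · rw [if_neg h, if_neg h]
    congr 1

-- ===== VERDICT (by name: the statement is the Claim_ definition above) =====
theorem merge_issues_report_spec : Claim_equal_merge_issues_report := by
  intro ibt _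
  unfold Spec_merge_issues_report
  rw [pvA_eq, pvB_contents, pv_outer]
  dsimp only
  generalize ibt.flatMap pvEntry = X
  by_cases h : X = []
  · simp [h, pvNumbered_nil]
  · rw [if_neg (by simpa [pvNumbered_eq_nil_iff] using h), if_neg h]
    rw [List.nil_append]
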